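-- pv_equiv track=rewrite | github.com/ahmadhibban/My-Salah-Tracker | guaranteed_fix.py | replace_method
-- ===== SOURCE A (Python) =====
-- def replace_method(code, method_name, new_method_code):
--     start = code.find(method_name)
--     if start == -1: return code
--     brace_start = code.find('{', start)
--     if brace_start == -1: return code
--     brace_count = 1
--     end = -1
--     for i in range(brace_start + 1, len(code)):
--         if code[i] == '{': brace_count += 1
--         elif code[i] == '}':
--             brace_count -= 1
--             if brace_count == 0:
--                 end = i + 1
--                 break
--     if end != -1:
--         return code[:start] + new_method_code + code[end:]
--     return code
-- ===== SOURCE B (Python) =====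
-- def replace_method(code, method_name, new_method_code):
--     start = code.find(method_name)
--     if start == -1:
--         return code
--     brace_start = code.find('{', start)
--     if brace_start == -1:
--         return code
--     depth = 1
--     pos = brace_start + 1
--     while True:
--         nxt_close = code.find('}', pos)
--         if nxt_close == -1:
--             return code
--         nxt_open = code.find('{', pos)
--         if nxt_open != -1 and nxt_open < nxt_close:
--             depth += 1
--             pos = nxt_open + 1
--         else:
--             depth -= 1
--             if depth == 0:
--                 return code[:start] + new_method_code + code[nxt_close + 1:]
--             pos = nxt_close + 1
-- ===== Notes on version B (the rewrite author's own statement) =====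
-- stated objective: alternative
-- what changed: B replaces A's character-by-character index loop with a loop that jumps between brace positions located by str.find('{'/'}', pos), skipping non-brace characters.
import Mathlib
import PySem

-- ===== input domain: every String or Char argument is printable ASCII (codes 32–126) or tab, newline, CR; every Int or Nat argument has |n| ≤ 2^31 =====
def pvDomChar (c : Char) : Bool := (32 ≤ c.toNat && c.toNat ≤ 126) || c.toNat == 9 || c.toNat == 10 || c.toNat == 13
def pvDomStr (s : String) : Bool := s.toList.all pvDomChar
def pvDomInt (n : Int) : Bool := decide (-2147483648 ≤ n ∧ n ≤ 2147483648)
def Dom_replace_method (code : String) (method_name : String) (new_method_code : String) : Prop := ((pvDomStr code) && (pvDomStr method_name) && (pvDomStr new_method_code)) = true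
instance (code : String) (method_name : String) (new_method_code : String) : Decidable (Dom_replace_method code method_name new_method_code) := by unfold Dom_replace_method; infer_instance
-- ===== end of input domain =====

-- B replaces A's character-by-character index loop with a loop that jumps between brace
-- positions located by find('{'/'}', pos); same return value, different traversal (objective: alternative).

-- ===== PORT A =====
-- A's for-loop over range(brace_start+1, len(code)): structural recursion over the
-- remaining characters, carrying the running index i and brace_count; result is `end` (-1 if no break).
def pvLoopA : List Char → Int → Int → Int
  | [], _, _ => -1
  | c :: rest, i, count =>
    if c = '{' then pvLoopA rest (i + 1) (count + 1)
    else if c = '}' then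
      (if count - 1 = 0 then i + 1 else pvLoopA rest (i + 1) (count - 1))
    else pvLoopA rest (i + 1) count

def replace_method (code : String) (method_name : String) (new_method_code : String) : String :=
  let start := PySem.Str.find code method_name
  if start = -1 then code
  else
    let brace_start := PySem.Str.findFrom code "{" start
    if brace_start = -1 then code
    else
      let e := pvLoopA (code.toList.drop (brace_start.toNat + 1)) (((brace_start.toNat + 1 : Nat) : Int)) 1
      if e ≠ -1 then
        String.ofList (PySem.List.slice code.toList none (some start) ++ new_method_code.toList
          ++ PySem.List.slice code.toList (some e) none)
      else code

-- ===== PORT B =====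
-- B's while-True loop over brace positions; fuel = code.length + 1 (pos strictly increases
-- and stays ≤ length, so the fuel is never exhausted); none = "return code".
def pvLoopB (code : String) : Nat → Int → Int → Option Int
  | 0, _, _ => none
  | f + 1, pos, depth =>
    let nc := PySem.Str.findFrom code "}" pos
    if nc = -1 then none
    else
      let no := PySem.Str.findFrom code "{" pos
      if no ≠ -1 ∧ no < nc then pvLoopB code f (no + 1) (depth + 1)
      else if depth - 1 = 0 then some (nc + 1)
      else pvLoopB code f (nc + 1) (depth - 1)

def replace_method_alt (code : String) (method_name : String) (new_method_code : String) : String :=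
  let start := PySem.Str.find code method_name
  if start = -1 then code
  else
    let brace_start := PySem.Str.findFrom code "{" start
    if brace_start = -1 then code
    else
      match pvLoopB code (code.toList.length + 1) (brace_start + 1) 1 with
      | none => code
      | some e =>
        String.ofList (PySem.List.slice code.toList none (some start) ++ new_method_code.toList
          ++ PySem.List.slice code.toList (some e) none)

-- ===== PRECONDITION & SPEC =====
def Spec_replace_method (code : String) (method_name : String) (new_method_code : String) (out : String) : Prop := out = replace_method_alt code method_name new_method_code
instance (code : String) (method_name : String) (new_method_code : String) (out : String) : Decidable (Spec_replace_method code method_name new_method_code out) := by unfold Spec_replace_method; infer_instance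

-- ===== CLAIM (what is proved, stated in full; the proofs are below) =====
def Claim_equal_replace_method : Prop := ∀ (code : String) (method_name : String) (new_method_code : String), Dom_replace_method code method_name new_method_code → Spec_replace_method code method_name new_method_code (replace_method code method_name new_method_code)

-- ===== LEMMAS AND PROOFS =====

lemma singleton_prefix_iff (c : Char) (l : List Char) : [c] <+: l ↔ l.head? = some c := by
  cases l with
  | nil => simp
  | cons a t => simp [List.cons_prefix_cons, eq_comm]

-- A's loop returns -1 on a '}'-free list
lemma pvLoopA_no_close (l : List Char) (i count : Int) (h : '}' ∉ l) :
    pvLoopA l i count = -1 := by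
  induction l generalizing i count with
  | nil => rfl
  | cons a t ih =>
    simp only [List.mem_cons, not_or] at h
    by_cases ha : a = '{'
    · simp [pvLoopA, ha, ih _ _ h.2]
    · simp [pvLoopA, ha, Ne.symm h.1, ih _ _ h.2]

-- skipping a brace-free prefix
lemma pvLoopA_skip (pre rest : List Char) (i count : Int)
    (h : ∀ x ∈ pre, x ≠ '{' ∧ x ≠ '}') :
    pvLoopA (pre ++ rest) i count = pvLoopA rest (i + pre.length) count := by
  induction pre generalizing i with
  | nil => simp
  | cons a t ih =>
    have ha := h a (by simp)
    have ht : ∀ x ∈ t, x ≠ '{' ∧ x ≠ '}' := fun x hx => h x (by simp [hx])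
    simp only [List.cons_append, pvLoopA, ha.1, ha.2, if_false]
    rw [ih _ ht]
    congr 1
    simp only [List.length_cons]
    push_cast
    ring

-- single-char infix ↔ membership
lemma singleton_infix_iff (c : Char) (l : List Char) : [c] <:+: l ↔ c ∈ l := by
  constructor
  · intro h; exact h.subset (by simp)
  · intro h; obtain ⟨s, t, rfl⟩ := List.append_of_mem h; exact ⟨s, t, by simp⟩

-- a prefix of d before its first occurrence of c contains no c
lemma take_free (d : List Char) (m : Nat) (c : Char)
    (h : ∀ i < m, ¬ [c] <+: d.drop i) : ∀ x ∈ d.take m, x ≠ c := by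
  intro x hx
  rw [List.mem_take_iff_getElem] at hx
  obtain ⟨i, hi, rfl⟩ := hx
  intro hc
  exact h i (by omega) (by
    rw [singleton_prefix_iff, List.head?_drop]
    simp [List.getElem?_eq_getElem (by omega : i < d.length), hc])

-- the main loop equivalence: B's find-jumping loop computes A's scan result
lemma loop_eq (code : String) (f pos : Nat) (depth : Int)
    (hpos : pos ≤ code.toList.length) (hf : code.toList.length + 1 - pos ≤ f) :
    pvLoopB code f ((pos : Nat) : Int) depth =
      (if pvLoopA (code.toList.drop pos) ((pos : Nat) : Int) depth = -1 then none
       else some (pvLoopA (code.toList.drop pos) ((pos : Nat) : Int) depth)) := by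
  induction f generalizing pos depth with
  | zero => omega
  | succ f ih =>
    have hffc := PySem.Chars.findFrom_natCast code.toList ['}'] pos hpos
    have hffo := PySem.Chars.findFrom_natCast code.toList ['{'] pos hpos
    set cs := code.toList with hcs
    set d := cs.drop pos with hd
    have hdl : d.length = cs.length - pos := by simp [hd]
    by_cases hfc : PySem.Chars.find d ['}'] = -1
    · -- no closing brace: B returns none, A's scan returns -1
      have hmem : '}' ∉ d := by
        rw [PySem.Chars.find_eq_neg_one_iff] at hfc
        simpa [singleton_infix_iff] using hfc
      have hB : pvLoopB code (f+1) ((pos : Nat) : Int) depth = none := by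
        simp only [pvLoopB, PySem.Str.findFrom_eq]
        rw [show ("}".toList) = ['}'] from rfl, hffc]
        simp [hfc]
      rw [hB, pvLoopA_no_close d _ _ hmem]
      simp
    · -- a closing brace exists at relative index fcN
      have hfc0 : 0 ≤ PySem.Chars.find d ['}'] := by
        have := PySem.Chars.neg_one_le_find d ['}']
        omega
      obtain ⟨hfcpre, hfcmin⟩ := PySem.Chars.find_spec hfc0
      set fcN := (PySem.Chars.find d ['}']).toNat with hfcN
      have hfcget : d[fcN]? = some '}' := by
        rw [singleton_prefix_iff, List.head?_drop] at hfcpre; exact hfcpre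
      have hfclt : fcN < d.length := by
        by_contra hcon
        rw [List.getElem?_eq_none (by omega)] at hfcget
        simp at hfcget
      have hnc : PySem.Chars.findFrom cs ['}'] ((pos : Nat) : Int) none = (pos : Int) + fcN := by
        rw [hffc, if_neg hfc, hfcN]
        simp [Int.toNat_of_nonneg hfc0]
      have hncne : ((pos : Int) + (fcN : Int)) ≠ -1 := by omega
      by_cases hopen : PySem.Chars.find d ['{'] ≠ -1 ∧ (PySem.Chars.find d ['{']).toNat < fcN
      · -- an opening brace comes first, at relative index foN
        have hfo0 : 0 ≤ PySem.Chars.find d ['{'] := by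
          have := PySem.Chars.neg_one_le_find d ['{']
          omega
        obtain ⟨hfopre, hfomin⟩ := PySem.Chars.find_spec hfo0
        set foN := (PySem.Chars.find d ['{']).toNat with hfoN
        have hfoget : d[foN]? = some '{' := by
          rw [singleton_prefix_iff, List.head?_drop] at hfopre; exact hfopre
        have hfolt : foN < d.length := by omega
        have hno : PySem.Chars.findFrom cs ['{'] ((pos : Nat) : Int) none = (pos : Int) + foN := by
          rw [hffo, if_neg hopen.1, hfoN]
          simp [Int.toNat_of_nonneg hfo0]
        have hB : pvLoopB code (f+1) ((pos : Nat) : Int) depth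
            = pvLoopB code f (((pos + foN + 1 : Nat)) : Int) (depth + 1) := by
          simp only [pvLoopB, PySem.Str.findFrom_eq]
          rw [show ("}".toList) = ['}'] from rfl, show ("{".toList) = ['{'] from rfl, hnc, hno,
            if_neg hncne, if_pos ⟨by omega, by omega⟩]
          congr 1
          all_goals push_cast
          all_goals try ring
        have hfree : ∀ x ∈ d.take foN, x ≠ '{' ∧ x ≠ '}' := by
          intro x hx
          exact ⟨take_free d foN '{' (fun i hi => hfomin i (by omega)) x hx,
                 take_free d foN '}' (fun i hi => hfcmin i (by omega)) x hx⟩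
        have hfoel : d[foN] = '{' := by
          have h2 := List.getElem?_eq_getElem hfolt
          rw [h2] at hfoget
          injection hfoget
        have hsplit : d = d.take foN ++ '{' :: cs.drop (pos + foN + 1) := by
          conv_lhs => rw [← List.take_append_drop foN d]
          rw [List.drop_eq_getElem_cons hfolt, hfoel, hd, List.drop_drop]
          congr 3
          all_goals omega
        have hA : pvLoopA d ((pos : Nat) : Int) depth
            = pvLoopA (cs.drop (pos + foN + 1)) (((pos + foN + 1 : Nat)) : Int) (depth + 1) := by
          conv_lhs => rw [hsplit]
          rw [pvLoopA_skip _ _ _ _ hfree]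
          have hlen : (d.take foN).length = foN := by
            rw [List.length_take]
            omega
          rw [hlen]
          simp only [pvLoopA, if_pos rfl]
          congr 1
          all_goals push_cast
          all_goals try ring
        rw [hB, hA, ih (pos + foN + 1) (depth + 1) (by omega) (by omega)]
      · -- the closing brace comes first
        have hcondB : ¬ (PySem.Chars.findFrom cs ['{'] ((pos : Nat) : Int) none ≠ -1 ∧
            PySem.Chars.findFrom cs ['{'] ((pos : Nat) : Int) none < (pos : Int) + fcN) := by
          rw [hffo]
          by_cases h1 : PySem.Chars.find d ['{'] = -1
          · simp [h1]
          · have hfo0 : 0 ≤ PySem.Chars.find d ['{'] := by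
              have := PySem.Chars.neg_one_le_find d ['{']
              omega
            rw [if_neg h1, not_and_or] at *
            rcases hopen with h | h
            · exact absurd h1 (by simpa using h)
            · right
              omega
        have hfreeC : ∀ x ∈ d.take fcN, x ≠ '{' ∧ x ≠ '}' := by
          intro x hx
          refine ⟨?_, take_free d fcN '}' (fun i hi => hfcmin i (by omega)) x hx⟩
          by_cases h1 : PySem.Chars.find d ['{'] = -1
          · intro hc
            rw [PySem.Chars.find_eq_neg_one_iff] at h1
            exact h1 (by rw [singleton_infix_iff, ← hc]; exact List.mem_of_mem_take hx)
          · have hfo0 : 0 ≤ PySem.Chars.find d ['{'] := by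
              have := PySem.Chars.neg_one_le_find d ['{']
              omega
            obtain ⟨_, hfomin⟩ := PySem.Chars.find_spec hfo0
            have hge : fcN ≤ (PySem.Chars.find d ['{']).toNat := by
              rw [not_and_or] at hopen
              rcases hopen with h | h
              · exact absurd h1 (by simpa using h)
              · omega
            exact take_free d fcN '{' (fun i hi => hfomin i (by omega)) x hx
        have hfcel : d[fcN] = '}' := by
          have h2 := List.getElem?_eq_getElem hfclt
          rw [h2] at hfcget
          injection hfcget
        have hsplit : d = d.take fcN ++ '}' :: cs.drop (pos + fcN + 1) := by
          conv_lhs => rw [← List.take_append_drop fcN d]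
          rw [List.drop_eq_getElem_cons hfclt, hfcel, hd, List.drop_drop]
          congr 3
          all_goals omega
        have hlen : (d.take fcN).length = fcN := by
          rw [List.length_take]
          omega
        have hA : pvLoopA d ((pos : Nat) : Int) depth
            = (if depth - 1 = 0 then ((pos : Int) + fcN) + 1
               else pvLoopA (cs.drop (pos + fcN + 1)) (((pos + fcN + 1 : Nat)) : Int) (depth - 1)) := by
          conv_lhs => rw [hsplit]
          rw [pvLoopA_skip _ _ _ _ hfreeC, hlen]
          simp only [pvLoopA, if_neg (by decide : ¬ ('}' = '{')), if_pos rfl]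
          split_ifs <;>
            first
              | rfl
              | omega
              | (congr 1; push_cast; ring)
              | simp_all
        by_cases h0 : depth - 1 = 0
        · have hB : pvLoopB code (f+1) ((pos : Nat) : Int) depth = some (((pos : Int) + fcN) + 1) := by
            simp only [pvLoopB, PySem.Str.findFrom_eq]
            rw [show ("}".toList) = ['}'] from rfl, show ("{".toList) = ['{'] from rfl, hnc,
              if_neg hncne, if_neg hcondB, if_pos h0]
          rw [hB, hA, if_pos h0, if_neg (by omega)]
        · have hB : pvLoopB code (f+1) ((pos : Nat) : Int) depth
              = pvLoopB code f (((pos + fcN + 1 : Nat)) : Int) (depth - 1) := by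
            simp only [pvLoopB, PySem.Str.findFrom_eq]
            rw [show ("}".toList) = ['}'] from rfl, show ("{".toList) = ['{'] from rfl, hnc,
              if_neg hncne, if_neg hcondB, if_neg h0]
            congr 1
            all_goals push_cast
            all_goals try ring
          rw [hB, hA, if_neg h0, ih (pos + fcN + 1) (depth - 1) (by omega) (by omega)]

-- ===== VERDICT (by name: the statement is the Claim_ definition above) =====
theorem replace_method_spec : Claim_equal_replace_method := by
  intro code method_name new_method_code _
  unfold Spec_replace_method replace_method replace_method_alt
  simp only [PySem.Str.find_eq, PySem.Str.findFrom_eq, show ("{".toList) = ['{'] from rfl]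
  by_cases h1 : PySem.Chars.find code.toList method_name.toList = -1
  · simp [h1]
  · simp only [h1, if_false]
    have hs0 : 0 ≤ PySem.Chars.find code.toList method_name.toList := by
      have := PySem.Chars.neg_one_le_find code.toList method_name.toList
      omega
    have hsle : PySem.Chars.find code.toList method_name.toList ≤ code.toList.length :=
      PySem.Chars.find_le_length _ _
    obtain ⟨k, hk⟩ : ∃ k : Nat, PySem.Chars.find code.toList method_name.toList = (k : Int) :=
      ⟨(PySem.Chars.find code.toList method_name.toList).toNat, by omega⟩
    have hkle : k ≤ code.toList.length := by omega
    rw [hk]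
    by_cases h2 : PySem.Chars.findFrom code.toList ['{'] ((k : Nat) : Int) none = -1
    · simp [h2]
    · simp only [h2, if_false]
      obtain ⟨hble, hbpre, -⟩ :=
        PySem.Chars.findFrom_natCast_spec code.toList ['{'] k hkle h2
      obtain ⟨m, hm⟩ : ∃ m : Nat,
          PySem.Chars.findFrom code.toList ['{'] ((k : Nat) : Int) none = (m : Int) :=
        ⟨(PySem.Chars.findFrom code.toList ['{'] ((k : Nat) : Int) none).toNat, by omega⟩
      rw [hm] at hbpre ⊢
      have hmget : code.toList[m]? = some '{' := by
        rw [singleton_prefix_iff, List.head?_drop] at hbpre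
        simpa using hbpre
      have hmlt : m < code.toList.length := by
        by_contra hcon
        rw [List.getElem?_eq_none (by omega)] at hmget
        simp at hmget
      rw [show ((m : Int) + 1) = (((m + 1 : Nat)) : Int) by push_cast; ring,
        loop_eq code (code.toList.length + 1) (m + 1) 1 (by omega) (by omega)]
      simp only [Int.toNat_natCast]
      push_cast
      by_cases he : pvLoopA (code.toList.drop (m + 1)) ((m : Int) + 1) 1 = -1
      · simp [he]
      · simp [he]
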